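-- pv_equiv track=rewrite | github.com/nagagopi19/Python-programms | Jumble with numbers.py | Jumble_with_numbers
-- ===== SOURCE A (Python) =====
-- def Jumble_with_numbers(n):
--     l1,l2=[],[]
--     for i in range(1,n+1):
--         l1.append(i*((2*i)-1))
--         l2.append(i*(i+1)//2)
--     if set(l1)&set(l2):
--         n_list=sorted(set(l1)&set(l2))
--         return n_list
-- ===== SOURCE B (Python) =====
-- def Jumble_with_numbers(n):
--     # Every hexagonal number H_i = i*(2*i-1) equals the triangular number
--     # T_{2*i-1}, and triangular values are strictly increasing, so H_i lies
--     # in both lists iff 2*i-1 <= n; those values are already in ascending order.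
--     res = [i * (2 * i - 1) for i in range(1, (n + 1) // 2 + 1)]
--     if res:
--         return res
-- ===== Notes on version B (the rewrite author's own statement) =====
-- stated objective: faster
-- what changed: Instead of building both number lists and intersecting their sets, B uses the identity H_i = T_{2i-1} (every hexagonal number is the triangular number of odd index, and triangular values are distinct) to emit the intersection directly, already sorted, in one comprehension of length (n+1)//2.
import Mathlib
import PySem

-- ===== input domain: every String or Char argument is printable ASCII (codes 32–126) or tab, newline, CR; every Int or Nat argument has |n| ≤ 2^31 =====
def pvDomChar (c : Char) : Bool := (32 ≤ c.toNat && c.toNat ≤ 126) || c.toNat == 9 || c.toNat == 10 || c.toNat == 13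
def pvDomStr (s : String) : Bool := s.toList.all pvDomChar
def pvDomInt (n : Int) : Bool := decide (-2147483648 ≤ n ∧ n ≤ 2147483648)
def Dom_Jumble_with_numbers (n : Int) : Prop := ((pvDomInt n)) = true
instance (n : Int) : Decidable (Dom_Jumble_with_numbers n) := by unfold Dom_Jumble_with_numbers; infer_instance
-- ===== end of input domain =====

-- B replaces the two lists + set intersection + sort by directly generating the
-- hexagonal numbers H_i = i*(2i-1) with 2i-1 ≤ n, which are exactly the common
-- values and already ascending (objective: faster, no sets or sorting).

-- ===== PORT A =====
def Jumble_with_numbers (n : Int) : Option (List Int) :=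
  let st := (PySem.List.pyRange 1 (n + 1) 1).foldl
    (fun (p : List Int × List Int) i =>
      (p.1 ++ [i * ((2 * i) - 1)], p.2 ++ [PySem.Int.floordiv (i * (i + 1)) 2]))
    ([], [])
  let inter := PySem.Set.inter (PySem.Set.ofList st.1) (PySem.Set.ofList st.2)
  if inter ≠ [] then
    some (PySem.List.sorted inter (fun x => x) false)
  else none

-- ===== PORT B =====
def Jumble_with_numbers_alt (n : Int) : Option (List Int) :=
  let res := (PySem.List.pyRange 1 (PySem.Int.floordiv (n + 1) 2 + 1) 1).map
    (fun i => i * (2 * i - 1))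
  if res ≠ [] then some res else none

-- ===== PRECONDITION & SPEC =====
def Spec_Jumble_with_numbers (n : Int) (out : Option (List Int)) : Prop := out = Jumble_with_numbers_alt n
instance (n : Int) (out : Option (List Int)) : Decidable (Spec_Jumble_with_numbers n out) := by unfold Spec_Jumble_with_numbers; infer_instance

-- ===== CLAIM (what is proved, stated in full; the proofs are below) =====
def Claim_equal_Jumble_with_numbers : Prop := ∀ (n : Int), Dom_Jumble_with_numbers n → Spec_Jumble_with_numbers n (Jumble_with_numbers n)

-- ===== LEMMAS AND PROOFS =====

theorem fd2 (m : Int) : PySem.Int.floordiv m 2 = m / 2 := by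
  show m.fdiv 2 = m / 2
  rw [Int.fdiv_eq_ediv]; simp

theorem foldl_append_singleton {α β : Type} (f : α → β) :
    ∀ (l : List α) (init : List β),
      l.foldl (fun acc x => acc ++ [f x]) init = init ++ l.map f := by
  intro l
  induction l with
  | nil => simp
  | cons x xs ih => intro init; simp [List.foldl, ih]

-- The loop of A builds the two map lists.
theorem loop_eq (n : Int) :
    (PySem.List.pyRange 1 (n + 1) 1).foldl
      (fun (p : List Int × List Int) i =>
        (p.1 ++ [i * ((2 * i) - 1)], p.2 ++ [PySem.Int.floordiv (i * (i + 1)) 2]))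
      ([], [])
    = ((PySem.List.pyRange 1 (n + 1) 1).map (fun i => i * ((2 * i) - 1)),
       (PySem.List.pyRange 1 (n + 1) 1).map (fun i => PySem.Int.floordiv (i * (i + 1)) 2)) := by
  rw [PySem.List.foldl_prod_mk (f := fun acc (i : Int) => acc ++ [i * ((2 * i) - 1)])
        (g := fun acc (i : Int) => acc ++ [PySem.Int.floordiv (i * (i + 1)) 2])]
  rw [foldl_append_singleton, foldl_append_singleton]
  simp

theorem tri_inj {j k : Int} (hj : 1 ≤ j) (hk : 1 ≤ k)
    (h : j * (j + 1) = k * (k + 1)) : j = k := by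
  nlinarith [sq_nonneg (j - k), sq_nonneg (j + k)]

-- Membership characterisation of A's intersection.
theorem mem_inter_iff (n x : Int) :
    (x ∈ PySem.Set.inter
        (PySem.Set.ofList ((PySem.List.pyRange 1 (n + 1) 1).map (fun i => i * ((2 * i) - 1))))
        (PySem.Set.ofList ((PySem.List.pyRange 1 (n + 1) 1).map (fun i => PySem.Int.floordiv (i * (i + 1)) 2))))
    ↔ x ∈ (PySem.List.pyRange 1 (PySem.Int.floordiv (n + 1) 2 + 1) 1).map (fun i => i * (2 * i - 1)) := by
  rw [PySem.Set.mem_inter]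
  simp only [PySem.Set.mem_ofList, List.mem_map, PySem.List.mem_pyRange_one, fd2]
  constructor
  · rintro ⟨⟨i, ⟨hi1, hi2⟩, hx1⟩, ⟨j, ⟨hj1, hj2⟩, hx2⟩⟩
    -- x = i(2i-1) = T_{2i-1} and x = T_j, so j = 2i-1 ≤ n, hence i ≤ (n+1)//2
    obtain ⟨k, hk⟩ := Int.even_mul_succ_self j
    have h2x : 2 * x = j * (j + 1) := by omega
    have h2x' : 2 * x = (2 * i - 1) * ((2 * i - 1) + 1) := by
      rw [← hx1] at h2x ⊢; nlinarith [h2x]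
    have hji : j = 2 * i - 1 := tri_inj hj1 (by omega) (by omega)
    exact ⟨i, ⟨hi1, by omega⟩, hx1⟩
  · rintro ⟨i, ⟨hi1, hi2⟩, hx⟩
    have hin : 2 * i - 1 ≤ n := by omega
    refine ⟨⟨i, ⟨hi1, by omega⟩, hx⟩, ⟨2 * i - 1, ⟨by omega, by omega⟩, ?_⟩⟩
    have hq : (2 * i - 1) * ((2 * i - 1) + 1) = 2 * (i * (2 * i - 1)) := by ring
    rw [hq]; omega

-- B's list is strictly increasing.
theorem res_pairwise (n : Int) :
    ((PySem.List.pyRange 1 (PySem.Int.floordiv (n + 1) 2 + 1) 1).map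
      (fun i => i * (2 * i - 1))).Pairwise (· < ·) := by
  rw [List.pairwise_map]
  refine (PySem.List.pairwise_lt_pyRange_one 1 _).imp_of_mem ?_
  intro a b ha hb hab
  rw [PySem.List.mem_pyRange_one] at ha hb
  nlinarith [ha.1, hb.1]

theorem inter_eq_res (n : Int) :
    let l1 := (PySem.List.pyRange 1 (n + 1) 1).map (fun i => i * ((2 * i) - 1))
    let l2 := (PySem.List.pyRange 1 (n + 1) 1).map (fun i => PySem.Int.floordiv (i * (i + 1)) 2)
    let inter := PySem.Set.inter (PySem.Set.ofList l1) (PySem.Set.ofList l2)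
    let res := (PySem.List.pyRange 1 (PySem.Int.floordiv (n + 1) 2 + 1) 1).map (fun i => i * (2 * i - 1))
    PySem.List.sorted inter (fun x => x) false = res ∧ (inter = [] ↔ res = []) := by
  intro l1 l2 inter res
  have hmem : ∀ x, x ∈ inter ↔ x ∈ res := fun x => mem_inter_iff n x
  have hnd_inter : inter.Nodup :=
    PySem.Set.nodup_inter _ _ (PySem.Set.nodup_ofList l1)
  have hnd_res : res.Nodup := (res_pairwise n).nodup
  have hperm : res.Perm inter :=
    (List.perm_ext_iff_of_nodup hnd_res hnd_inter).mpr (fun x => (hmem x).symm)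
  constructor
  · exact PySem.List.sorted_eq_of_perm_of_pairwise_lt _ _ _ hperm (res_pairwise n)
  · constructor
    · intro h; exact List.eq_nil_iff_forall_not_mem.mpr
        (fun x hx => by have := (hmem x).mpr hx; simp [h] at this)
    · intro h; exact List.eq_nil_iff_forall_not_mem.mpr
        (fun x hx => by have := (hmem x).mp hx; simp [h] at this)

-- ===== VERDICT (by name: the statement is the Claim_ definition above) =====
theorem Jumble_with_numbers_spec : Claim_equal_Jumble_with_numbers := by
  intro n _
  unfold Spec_Jumble_with_numbers Jumble_with_numbers Jumble_with_numbers_alt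
  rw [loop_eq]
  obtain ⟨hsorted, hempty⟩ := inter_eq_res n
  by_cases h : (PySem.Set.inter
      (PySem.Set.ofList ((PySem.List.pyRange 1 (n + 1) 1).map (fun i => i * ((2 * i) - 1))))
      (PySem.Set.ofList ((PySem.List.pyRange 1 (n + 1) 1).map
        (fun i => PySem.Int.floordiv (i * (i + 1)) 2)))) = []
  · have hres : ((PySem.List.pyRange 1 (PySem.Int.floordiv (n + 1) 2 + 1) 1).map
        (fun i => i * (2 * i - 1))) = [] := hempty.mp h
    simp only [h, hres]
    simp
  · have hres : ¬ ((PySem.List.pyRange 1 (PySem.Int.floordiv (n + 1) 2 + 1) 1).map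
        (fun i => i * (2 * i - 1))) = [] := fun hr => h (hempty.mpr hr)
    simp only [ne_eq, h, hres, not_false_eq_true, if_true]
    rw [hsorted]
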